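-- pv_equiv track=rewrite | github.com/hdp0545/TIL | 2.Algorithm/pycharm/hyun-dai/2.py | solution
-- ===== SOURCE A (Python) =====
-- def solution(l1, l2):
--     tank_small = min(l1, l2)
--     tank_large = max(l1, l2)
--     visit = [0 for _ in range(tank_large+1)]
--     i = tank_large
--     result = []
--     while visit[i] == 0:
--         visit[i] = 1
--         i -= tank_small
--         if i <= 0:
--             i += tank_large
--     for idx, value in enumerate(visit):
--         if value == 1:
--             result.append(idx)
--     return result
-- ===== SOURCE B (Python) =====
-- def solution(l1, l2):
--     # gcd by Euclid, then the visited positions are exactly the multiples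
--     # of the gcd in 1..max (closed form instead of simulating the walk).
--     a, b = l1, l2
--     while b:
--         a, b = b, a % b
--     return list(range(a, max(l1, l2) + 1, a))
-- ===== Notes on version B (the rewrite author's own statement) =====
-- stated objective: faster
-- what changed: B replaces the O(L) array-marking walk simulation with Euclid's gcd followed by a direct range(g, max+1, g) construction of the answer.
-- outside the precondition, e.g. on solution(0, 0): A returns [0], B raises ValueError
import Mathlib
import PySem

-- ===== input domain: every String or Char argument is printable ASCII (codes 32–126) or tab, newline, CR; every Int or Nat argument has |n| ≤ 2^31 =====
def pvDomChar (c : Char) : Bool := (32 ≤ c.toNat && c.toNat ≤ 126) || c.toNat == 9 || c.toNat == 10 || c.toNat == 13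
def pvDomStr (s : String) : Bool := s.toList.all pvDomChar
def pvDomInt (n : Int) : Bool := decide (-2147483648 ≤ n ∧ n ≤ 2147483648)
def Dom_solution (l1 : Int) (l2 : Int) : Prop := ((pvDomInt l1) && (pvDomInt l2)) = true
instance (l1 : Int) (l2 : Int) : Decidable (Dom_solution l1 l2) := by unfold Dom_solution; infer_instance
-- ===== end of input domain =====

-- B replaces A's O(L) array-marking walk simulation by Euclid's gcd plus a direct
-- range(g, max+1, g); measurably faster (asymptotic).

-- ===== PORT A =====
-- the while loop of A; fuel = len(visit)+1 is a totality guard only (each pass marks a fresh 0)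
def pvLoopA (small large : Int) : Nat → List Int → Int → List Int
  | 0, visit, _ => visit
  | fuel + 1, visit, i =>
    if PySem.List.pyGetD visit i 1 = 0 then
      pvLoopA small large fuel (PySem.List.pySetD visit i 1)
        (if i - small ≤ 0 then i - small + large else i - small)
    else visit

def solution (l1 : Int) (l2 : Int) : List Int :=
  let tank_small := min l1 l2
  let tank_large := max l1 l2
  let visit := (PySem.List.pyRange 0 (tank_large + 1) 1).map (fun _ => (0 : Int))
  let visit' := pvLoopA tank_small tank_large (visit.length + 1) visit tank_large
  (PySem.List.enumerate visit').foldl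
    (fun result p => if p.2 = 1 then result ++ [p.1] else result) []

-- ===== PORT B =====
-- the while loop of B (Euclid); fuel = |b|+1 is a totality guard only
def pvEuclidB : Nat → Int → Int → Int
  | 0, a, _ => a
  | fuel + 1, a, b => if b = 0 then a else pvEuclidB fuel b (PySem.Int.mod a b)

def solution_alt (l1 : Int) (l2 : Int) : List Int :=
  let g := pvEuclidB (l2.natAbs + 1) l1 l2
  PySem.List.pyRange g (max l1 l2 + 1) g

-- ===== PRECONDITION & SPEC =====
-- Pre_ excludes negative inputs, on which A raises IndexError, and (0,0), on which
-- A's walk accidentally returns [0] while B's natural range(0, 1, 0) raises ValueError.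
def Pre_solution (l1 : Int) (l2 : Int) : Prop := 0 ≤ l1 ∧ 0 ≤ l2 ∧ ¬(l1 = 0 ∧ l2 = 0)
instance (l1 : Int) (l2 : Int) : Decidable (Pre_solution l1 l2) := by unfold Pre_solution; infer_instance
def pvWitness_solution : Int × Int := (4, 6)

def Spec_solution (l1 : Int) (l2 : Int) (out : List Int) : Prop := out = solution_alt l1 l2
instance (l1 : Int) (l2 : Int) (out : List Int) : Decidable (Spec_solution l1 l2 out) := by unfold Spec_solution; infer_instance

-- ===== CLAIM (what is proved, stated in full; the proofs are below) =====
def Claim_equal_solution : Prop := ∀ (l1 : Int) (l2 : Int), Dom_solution l1 l2 → Pre_solution l1 l2 → Spec_solution l1 l2 (solution l1 l2)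

-- ===== LEMMAS AND PROOFS =====

-- position of the walk after k steps, as a natural number in [1, L]
def pvF (s L k : ℕ) : ℕ := L - k * s % L

-- the visit array after k iterations of the loop
def pvVisit (s L k : ℕ) : List Int :=
  (List.range (L + 1)).map (fun j => if ∃ m, m < k ∧ pvF s L m = j then (1 : Int) else 0)

-- ---- Euclid = gcd ----
lemma pvEuclidB_eq_gcd : ∀ (fuel : ℕ) (a b : Int), 0 ≤ a → 0 ≤ b → b.natAbs < fuel →
    pvEuclidB fuel a b = (Int.gcd a b : Int) := by
  intro fuel
  induction fuel with
  | zero => intro a b _ _ h; exact absurd h (Nat.not_lt_zero _)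
  | succ f ih =>
    intro a b ha hb hf
    obtain ⟨m, rfl⟩ := Int.eq_ofNat_of_zero_le ha
    obtain ⟨n, rfl⟩ := Int.eq_ofNat_of_zero_le hb
    by_cases hb0 : (n : Int) = 0
    · have hn0 : n = 0 := by exact_mod_cast hb0
      subst hn0
      simp [pvEuclidB, Int.gcd, Int.natAbs_natCast]
    · have hbpos : (0 : Int) < (n : Int) := lt_of_le_of_ne hb (Ne.symm hb0)
      have hnpos : 0 < n := by exact_mod_cast hbpos
      have hmod : PySem.Int.mod (m : Int) (n : Int) = (m : Int) % (n : Int) :=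
        PySem.Int.mod_eq_emod_of_pos hbpos
      have hcast : (m : Int) % (n : Int) = ((m % n : ℕ) : Int) := (Int.natCast_mod m n).symm
      have hmn' : m % n < n := Nat.mod_lt _ hnpos
      have hfn : n < f + 1 := by
        have := hf
        simp only [Int.natAbs_natCast] at this
        omega
      have hstep : pvEuclidB (f + 1) (m : Int) (n : Int)
          = pvEuclidB f (n : Int) ((m % n : ℕ) : Int) := by
        rw [show pvEuclidB (f + 1) (m : Int) (n : Int)
            = if (n : Int) = 0 then (m : Int)
              else pvEuclidB f (n : Int) (PySem.Int.mod (m : Int) (n : Int)) from rfl,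
          if_neg hb0, hmod, hcast]
      rw [hstep, ih (n : Int) ((m % n : ℕ) : Int) hb (Int.natCast_nonneg _)
        (by simp only [Int.natAbs_natCast]; omega)]
      have hnat : Nat.gcd n (m % n) = Nat.gcd m n := by
        rw [Nat.gcd_comm n (m % n), ← Nat.gcd_rec n m, Nat.gcd_comm n m]
      show (↑(Int.gcd (↑n) (↑(m % n))) : ℤ) = ↑(Int.gcd (↑m) (↑n))
      unfold Int.gcd
      simp only [Int.natAbs_natCast]
      rw [hnat]

-- ---- number theory for the walk ----
lemma pvDvd_of_mul_dvd (s L d : ℕ) (hL : 0 < L) (h : L ∣ d * s) :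
    L / Nat.gcd s L ∣ d := by
  set g := Nat.gcd s L with hg
  have hgpos : 0 < g := Nat.gcd_pos_of_pos_right _ hL
  have hgs : g ∣ s := Nat.gcd_dvd_left _ _
  have hgL : g ∣ L := Nat.gcd_dvd_right _ _
  have h1 : d * s = d * (s / g) * g := by
    rw [mul_assoc, Nat.div_mul_cancel hgs]
  have h2 : L = L / g * g := (Nat.div_mul_cancel hgL).symm
  have h3 : L / g * g ∣ d * (s / g) * g := by rw [← h1, ← h2]; exact h
  have h4 : L / g ∣ d * (s / g) := (Nat.mul_dvd_mul_iff_right hgpos).mp h3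
  have hco : Nat.Coprime (s / g) (L / g) := Nat.coprime_div_gcd_div_gcd hgpos
  exact (Nat.Coprime.dvd_of_dvd_mul_right hco.symm) h4

lemma pvMod_inj (s L : ℕ) (hL : 0 < L) {j k : ℕ} (hjk : j ≤ k)
    (heq : j * s % L = k * s % L) : L / Nat.gcd s L ∣ (k - j) := by
  have h2 : j * s ≤ k * s := Nat.mul_le_mul_right _ hjk
  have hm : Nat.ModEq L (j * s) (k * s) := heq
  have hdvd : L ∣ k * s - j * s := (Nat.modEq_iff_dvd' h2).mp hm
  rw [← Nat.sub_mul] at hdvd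
  exact pvDvd_of_mul_dvd s L _ hL hdvd

lemma pvMod_N_eq_zero (s L : ℕ) (hL : 0 < L) : (L / Nat.gcd s L) * s % L = 0 := by
  have hgs : Nat.gcd s L ∣ s := Nat.gcd_dvd_left _ _
  have hgL : Nat.gcd s L ∣ L := Nat.gcd_dvd_right _ _
  have h : L ∣ (L / Nat.gcd s L) * s := by
    refine ⟨s / Nat.gcd s L, ?_⟩
    calc (L / Nat.gcd s L) * s
        = (L / Nat.gcd s L) * (Nat.gcd s L * (s / Nat.gcd s L)) := by
          rw [Nat.mul_div_cancel' hgs]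
      _ = ((L / Nat.gcd s L) * Nat.gcd s L) * (s / Nat.gcd s L) := by ring
      _ = L * (s / Nat.gcd s L) := by rw [Nat.div_mul_cancel hgL]
  obtain ⟨c, hc⟩ := h
  rw [hc]
  exact Nat.mul_mod_right L c

lemma pvMod_step (s L k : ℕ) (hL : 0 < L) (hs : s ≤ L) :
    (k + 1) * s % L = if k * s % L + s < L then k * s % L + s else k * s % L + s - L := by
  have h1 : (k + 1) * s = k * s + s := by ring
  rw [h1, ← Nat.mod_add_mod]
  have hr : k * s % L < L := Nat.mod_lt _ hL
  by_cases hc : k * s % L + s < L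
  · rw [if_pos hc]
    exact Nat.mod_eq_of_lt hc
  · rw [if_neg hc]
    push_neg at hc
    rw [Nat.mod_eq_sub_mod hc]
    exact Nat.mod_eq_of_lt (by omega)

lemma pvImage_eq (s L : ℕ) (hL : 0 < L) :
    (Finset.range (L / Nat.gcd s L)).image (fun k => k * s % L) =
    (Finset.range (L / Nat.gcd s L)).image (fun m => m * Nat.gcd s L) := by
  set g := Nat.gcd s L with hgdef
  have hgpos : 0 < g := Nat.gcd_pos_of_pos_right _ hL
  have hgs : g ∣ s := Nat.gcd_dvd_left _ _
  have hgL : g ∣ L := Nat.gcd_dvd_right _ _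
  set N := L / g with hNdef
  have hNg : N * g = L := Nat.div_mul_cancel hgL
  apply Finset.eq_of_subset_of_card_le
  · intro x hx
    simp only [Finset.mem_image, Finset.mem_range] at hx ⊢
    obtain ⟨k, hk, rfl⟩ := hx
    have hxL : k * s % L < L := Nat.mod_lt _ hL
    have hgx : g ∣ k * s % L := (Nat.dvd_mod_iff hgL).mpr (Dvd.dvd.mul_left hgs k)
    refine ⟨(k * s % L) / g, ?_, Nat.div_mul_cancel hgx⟩
    have hlt : k * s % L < g * N := by rw [mul_comm g N, hNg]; exact hxL
    exact Nat.div_lt_of_lt_mul hlt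
  · have hinj : Set.InjOn (fun k => k * s % L) ↑(Finset.range N) := by
      intro j hj k hk hjk
      simp only [Finset.coe_range, Set.mem_Iio] at hj hk
      simp only at hjk
      rcases le_total j k with h | h
      · have hd := pvMod_inj s L hL h hjk
        rw [← hNdef] at hd
        rcases Nat.eq_zero_or_pos (k - j) with h0 | h0
        · omega
        · have hge := Nat.le_of_dvd h0 hd
          omega
      · have hd := pvMod_inj s L hL h hjk.symm
        rw [← hNdef] at hd
        rcases Nat.eq_zero_or_pos (j - k) with h0 | h0
        · omega
        · have hge := Nat.le_of_dvd h0 hd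
          omega
    have hcard1 : ((Finset.range N).image (fun m => m * g)).card = N := by
      rw [Finset.card_image_of_injective _
        (fun a b hab => Nat.eq_of_mul_eq_mul_right hgpos hab)]
      exact Finset.card_range N
    have hcard2 : ((Finset.range N).image (fun k => k * s % L)).card = N := by
      rw [Finset.card_image_of_injOn hinj]
      exact Finset.card_range N
    rw [hcard1, hcard2]

lemma pvMarked_iff (s L : ℕ) (hL : 0 < L) (j : ℕ) (hj : j ≤ L) :
    (∃ m, m < L / Nat.gcd s L ∧ pvF s L m = j) ↔ Nat.gcd s L ∣ j ∧ 1 ≤ j := by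
  set g := Nat.gcd s L with hgdef
  have hgpos : 0 < g := Nat.gcd_pos_of_pos_right _ hL
  have hgs : g ∣ s := Nat.gcd_dvd_left _ _
  have hgL : g ∣ L := Nat.gcd_dvd_right _ _
  set N := L / g with hNdef
  have hNg : N * g = L := Nat.div_mul_cancel hgL
  constructor
  · rintro ⟨m, hm, rfl⟩
    have hr : m * s % L < L := Nat.mod_lt _ hL
    have hgr : g ∣ m * s % L := (Nat.dvd_mod_iff hgL).mpr (Dvd.dvd.mul_left hgs m)
    unfold pvF
    exact ⟨Nat.dvd_sub hgL hgr, by omega⟩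
  · rintro ⟨hdvd, hj1⟩
    obtain ⟨c, rfl⟩ := hdvd
    have hc0 : c ≠ 0 := by rintro rfl; simp at hj1
    have hcN : c ≤ N := by
      by_contra hlt
      push_neg at hlt
      have h1 : N * g < c * g := Nat.mul_lt_mul_of_lt_of_le hlt (le_refl g) hgpos
      rw [hNg, mul_comm c g] at h1
      omega
    have hx : L - g * c = (N - c) * g := by
      rw [Nat.sub_mul, hNg, mul_comm c g]
    have hmem : L - g * c ∈ (Finset.range N).image (fun m => m * g) := by
      simp only [Finset.mem_image, Finset.mem_range]
      exact ⟨N - c, by omega, hx.symm⟩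
    rw [← pvImage_eq s L hL] at hmem
    simp only [Finset.mem_image, Finset.mem_range] at hmem
    obtain ⟨k, hk, hkx⟩ := hmem
    refine ⟨k, hk, ?_⟩
    unfold pvF
    rw [hkx]
    omega

-- ---- the visit array ----
lemma pvVisit_length (s L k : ℕ) : (pvVisit s L k).length = L + 1 := by
  simp [pvVisit]

lemma pvVisit_get (s L k j : ℕ) (hj : j < (pvVisit s L k).length) :
    (pvVisit s L k)[j] = if ∃ m, m < k ∧ pvF s L m = j then (1 : Int) else 0 := by
  simp [pvVisit]

lemma pvVisit_set (s L k : ℕ) :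
    (pvVisit s L k).set (pvF s L k) 1 = pvVisit s L (k + 1) := by
  apply List.ext_getElem
  · simp [pvVisit]
  · intro n h1 h2
    rw [List.getElem_set]
    simp only [pvVisit, List.getElem_map, List.getElem_range]
    by_cases he : pvF s L k = n
    · rw [if_pos he, if_pos ⟨k, by omega, he⟩]
    · rw [if_neg he]
      apply if_congr _ rfl rfl
      constructor
      · rintro ⟨m, hm, hfm⟩
        exact ⟨m, by omega, hfm⟩
      · rintro ⟨m, hm, hfm⟩
        refine ⟨m, ?_, hfm⟩
        rcases Nat.lt_succ_iff_lt_or_eq.mp hm with h | h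
        · exact h
        · exact absurd hfm (by rw [h]; exact he)

-- ---- the loop ----
lemma pvLoop_eq (s L : ℕ) (hL : 0 < L) (hs : s ≤ L) :
    ∀ (fuel k : ℕ), k ≤ L / Nat.gcd s L → L / Nat.gcd s L - k < fuel →
    pvLoopA (s : Int) (L : Int) fuel (pvVisit s L k) ((L : Int) - ((k * s % L : ℕ) : Int)) =
      pvVisit s L (L / Nat.gcd s L) := by
  intro fuel
  induction fuel with
  | zero => intro k _ hf; exact absurd hf (Nat.not_lt_zero _)
  | succ f ih =>
    intro k hk hf
    set N := L / Nat.gcd s L with hNdef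
    have hgpos : 0 < Nat.gcd s L := Nat.gcd_pos_of_pos_right _ hL
    have hgL : Nat.gcd s L ∣ L := Nat.gcd_dvd_right _ _
    have hN1 : 1 ≤ N := by
      rw [hNdef]
      exact Nat.div_pos (Nat.le_of_dvd hL hgL) hgpos
    have hr : k * s % L < L := Nat.mod_lt _ hL
    have hidx : (L : Int) - ((k * s % L : ℕ) : Int) = ((pvF s L k : ℕ) : Int) := by
      unfold pvF; omega
    rw [hidx]
    have hfk : pvF s L k < L + 1 := by unfold pvF; omega
    have hget : PySem.List.pyGetD (pvVisit s L k) ((pvF s L k : ℕ) : Int) 1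
        = if ∃ m, m < k ∧ pvF s L m = pvF s L k then (1 : Int) else 0 := by
      rw [PySem.List.pyGetD_natCast,
        List.getD_eq_getElem _ _ (by rw [pvVisit_length]; omega)]
      exact pvVisit_get s L k _ (by rw [pvVisit_length]; omega)
    by_cases hkN : k = N
    · have hNmod : k * s % L = 0 := by rw [hkN, hNdef]; exact pvMod_N_eq_zero s L hL
      have hf0 : pvF s L 0 = L := by unfold pvF; simp
      have hfN : pvF s L k = L := by unfold pvF; rw [hNmod]; omega
      have hmarked : ∃ m, m < k ∧ pvF s L m = pvF s L k :=
        ⟨0, by omega, by rw [hf0, hfN]⟩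
      simp only [pvLoopA]
      rw [hget, if_pos hmarked, if_neg (by norm_num), hkN]
    · have hkltN : k < N := lt_of_le_of_ne hk hkN
      have hunmarked : ¬ ∃ m, m < k ∧ pvF s L m = pvF s L k := by
        rintro ⟨m, hm, heq⟩
        have hrm : m * s % L < L := Nat.mod_lt _ hL
        have heq' : m * s % L = k * s % L := by unfold pvF at heq; omega
        have hdvd := pvMod_inj s L hL (by omega : m ≤ k) heq'
        rw [← hNdef] at hdvd
        have := Nat.le_of_dvd (by omega) hdvd
        omega
      simp only [pvLoopA]
      rw [hget, if_neg hunmarked, if_pos rfl]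
      have hset : PySem.List.pySetD (pvVisit s L k) ((pvF s L k : ℕ) : Int) 1
          = pvVisit s L (k + 1) := by
        rw [PySem.List.pySetD_natCast]
        exact pvVisit_set s L k
      have hstep : (if ((pvF s L k : ℕ) : Int) - (s : Int) ≤ 0
            then ((pvF s L k : ℕ) : Int) - (s : Int) + (L : Int)
            else ((pvF s L k : ℕ) : Int) - (s : Int))
          = (L : Int) - (((k + 1) * s % L : ℕ) : Int) := by
        have hm := pvMod_step s L k hL hs
        have hr2 : (k + 1) * s % L < L := Nat.mod_lt _ hL
        unfold pvF
        rw [hm]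
        split_ifs <;> omega
      rw [hset, hstep]
      have hk1 : k + 1 ≤ N := hkltN
      have hf1 : N - (k + 1) < f := by
        clear hget hstep hset hunmarked hidx hfk
        omega
      exact ih (k + 1) hk1 hf1

-- ---- the result fold ----
lemma pvFold_filter (l : List (Int × Int)) (acc : List Int) :
    l.foldl (fun result p => if p.2 = 1 then result ++ [p.1] else result) acc
      = acc ++ (l.filter (fun p => p.2 == 1)).map Prod.fst := by
  induction l generalizing acc with
  | nil => simp
  | cons x xs ih =>
    rw [List.foldl_cons, ih]
    by_cases h : x.2 = 1
    · simp [List.filter_cons, h]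
    · simp [List.filter_cons, h]

lemma pvResult_eq (s L : ℕ) (hL : 0 < L) (hs : s ≤ L) :
    ((PySem.List.enumerate (pvVisit s L (L / Nat.gcd s L))).foldl
      (fun result p => if p.2 = 1 then result ++ [p.1] else result) []) =
    PySem.List.pyRange ((Nat.gcd s L : ℕ) : Int) ((L : Int) + 1) ((Nat.gcd s L : ℕ) : Int) := by
  set g := Nat.gcd s L with hgdef
  have hgpos : 0 < g := Nat.gcd_pos_of_pos_right _ hL
  have hgL : g ∣ L := Nat.gcd_dvd_right _ _
  have hgle : g ≤ L := Nat.le_of_dvd hL hgL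
  have hgz : (0 : Int) < (g : Int) := by exact_mod_cast hgpos
  set N := L / g with hNdef
  rw [pvFold_filter, List.nil_append]
  -- both lists are strictly increasing; prove they are permutations of each other
  have hsorted1 : List.Pairwise (· < ·)
      (((PySem.List.enumerate (pvVisit s L N)).filter (fun p => p.2 == 1)).map Prod.fst) := by
    apply List.Pairwise.map Prod.fst (fun a b h => h)
    exact List.Pairwise.filter _ (PySem.List.pairwise_lt_enumerate _ _)
  have hsorted2 : List.Pairwise (· < ·)
      (PySem.List.pyRange ((g : ℕ) : Int) ((L : Int) + 1) ((g : ℕ) : Int)) := by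
    rw [PySem.List.pyRange_of_pos _ _ hgz]
    apply List.Pairwise.map _ ?_ List.pairwise_lt_range
    intro a b hab
    have : (a : Int) < (b : Int) := by exact_mod_cast hab
    nlinarith
  have hmem : ∀ x : Int,
      x ∈ ((PySem.List.enumerate (pvVisit s L N)).filter (fun p => p.2 == 1)).map Prod.fst ↔
      x ∈ PySem.List.pyRange ((g : ℕ) : Int) ((L : Int) + 1) ((g : ℕ) : Int) := by
    intro x
    rw [PySem.List.mem_pyRange_iff_of_pos hgz]
    constructor
    · intro hx
      obtain ⟨p, hpf, rfl⟩ := List.mem_map.mp hx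
      obtain ⟨hpe, hpv⟩ := List.mem_filter.mp hpf
      obtain ⟨j, hjlen, rfl⟩ := (PySem.List.mem_enumerate_iff _ _ _).mp hpe
      rw [pvVisit_get s L N j hjlen] at hpv
      have hjL : j ≤ L := by
        have := hjlen
        rw [pvVisit_length] at this
        omega
      have hmk : ∃ m, m < N ∧ pvF s L m = j := by
        by_contra hcon
        rw [if_neg hcon] at hpv
        simp at hpv
      obtain ⟨hdj, hj1⟩ := (pvMarked_iff s L hL j hjL).mp hmk
      have hgj : g ≤ j := Nat.le_of_dvd (by omega) hdj
      refine ⟨by dsimp only; push_cast; omega, by dsimp only; push_cast; omega, ?_⟩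
      dsimp only
      simp only [zero_add]
      have h1 : ((g : ℕ) : Int) ∣ ((j : ℕ) : Int) := Int.natCast_dvd_natCast.mpr hdj
      exact dvd_sub h1 dvd_rfl
    · rintro ⟨hgx, hxL, hdx⟩
      have hx0 : 0 ≤ x := le_trans (by omega) hgx
      set j := x.toNat with hjdef
      have hxj : x = ((j : ℕ) : Int) := by omega
      have hjL : j ≤ L := by omega
      have hdj : g ∣ j := by
        have h1 : ((g : ℕ) : Int) ∣ x := by
          have := dvd_add hdx (dvd_refl ((g : ℕ) : Int))
          simpa using this
        rw [hxj] at h1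
        exact_mod_cast h1
      have hj1 : 1 ≤ j := by omega
      obtain ⟨m, hmN, hfm⟩ := (pvMarked_iff s L hL j hjL).mpr ⟨hdj, hj1⟩
      apply List.mem_map.mpr
      refine ⟨(((j : ℕ) : Int), (1 : Int)), ?_, by rw [hxj]⟩
      apply List.mem_filter.mpr
      refine ⟨?_, by simp⟩
      apply (PySem.List.mem_enumerate_iff _ _ _).mpr
      refine ⟨j, by rw [pvVisit_length]; omega, ?_⟩
      rw [pvVisit_get s L N j (by rw [pvVisit_length]; omega)]
      rw [if_pos ⟨m, hmN, hfm⟩]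
      simp
  have hperm := (List.perm_ext_iff_of_nodup
    (List.Pairwise.imp ne_of_lt hsorted1) (List.Pairwise.imp ne_of_lt hsorted2)).mpr hmem
  exact List.eq_of_perm_of_sorted
    (fun a b _ _ h1 h2 => absurd h2 (lt_asymm h1)) hsorted1 hsorted2 hperm

-- ===== VERDICT (by name: the statement is the Claim_ definition above) =====
theorem solution_spec : Claim_equal_solution := by
  unfold Claim_equal_solution
  intro l1 l2 _ hpre
  obtain ⟨h1, h2, h12⟩ := hpre
  unfold Spec_solution solution solution_alt
  dsimp only
  have hle1 : l1 ≤ max l1 l2 := le_max_left _ _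
  have hle2 : l2 ≤ max l1 l2 := le_max_right _ _
  have hge1 : min l1 l2 ≤ l1 := min_le_left _ _
  have hge2 : min l1 l2 ≤ l2 := min_le_right _ _
  have hmin0 : 0 ≤ min l1 l2 := le_min h1 h2
  have hmax0 : 0 ≤ max l1 l2 := le_trans h1 hle1
  set s : ℕ := (min l1 l2).toNat with hsdef
  set L : ℕ := (max l1 l2).toNat with hLdef
  have hmin : min l1 l2 = ((s : ℕ) : Int) := by omega
  have hmax : max l1 l2 = ((L : ℕ) : Int) := by omega
  have hsL : s ≤ L := by
    have : min l1 l2 ≤ max l1 l2 := min_le_max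
    omega
  have hL : 0 < L := by
    rcases Nat.eq_zero_or_pos L with h0 | h0
    · exfalso
      apply h12
      constructor <;> omega
    · exact h0
  have hgcd : Int.gcd l1 l2 = Nat.gcd s L := by
    rcases le_total l1 l2 with hc | hc
    · have e1 : min l1 l2 = l1 := min_eq_left hc
      have e2 : max l1 l2 = l2 := max_eq_right hc
      have : l1.natAbs = s ∧ l2.natAbs = L := by omega
      unfold Int.gcd
      rw [this.1, this.2]
    · have e1 : min l1 l2 = l2 := min_eq_right hc
      have e2 : max l1 l2 = l1 := max_eq_left hc
      have : l1.natAbs = L ∧ l2.natAbs = s := by omega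
      unfold Int.gcd
      rw [this.1, this.2, Nat.gcd_comm]
  rw [hmin, hmax]
  have hvis : (PySem.List.pyRange 0 (((L : ℕ) : Int) + 1) 1).map (fun _ => (0 : Int))
      = pvVisit s L 0 := by
    rw [PySem.List.pyRange_one, List.map_map]
    unfold pvVisit
    have hcnt : (((L : ℕ) : Int) + 1 - 0).toNat = L + 1 := by omega
    rw [hcnt]
    apply List.map_congr_left
    intro a _
    simp
  rw [hvis, pvVisit_length]
  have hfuel : L / Nat.gcd s L - 0 < L + 1 + 1 := by
    have hNL : L / Nat.gcd s L ≤ L := Nat.div_le_self _ _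
    exact lt_of_le_of_lt (le_trans (Nat.sub_le _ _) hNL) (by omega)
  have hloop := pvLoop_eq s L hL hsL (L + 1 + 1) 0 (Nat.zero_le _) hfuel
  norm_num at hloop
  rw [hloop]
  have heu : pvEuclidB (l2.natAbs + 1) l1 l2 = ((Int.gcd l1 l2 : ℕ) : Int) :=
    pvEuclidB_eq_gcd _ l1 l2 h1 h2 (by omega)
  rw [heu, hgcd]
  exact pvResult_eq s L hL hsL
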